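-- pv_equiv track=rewrite | github.com/HyunnnnKim/DailyAlgorithm | Python/BaekJoon/OXQuiz.py | oxQuiz
-- ===== SOURCE A (Python) =====
-- def oxQuiz(answer):
--     a = list(answer)
--     point = 0
--     total = 0
--     for x in a:
--         if x == 'O':
--             point += 1
--             total += point
--         else:
--             point = 0
--     return total
-- ===== SOURCE B (Python) =====
-- def oxQuiz(answer):
--     # Run-scanning: find each maximal run of 'O' and add its triangular number L*(L+1)//2.
--     total = 0
--     i = 0
--     n = len(answer)
--     while i < n:
--         if answer[i] == 'O':
--             j = i
--             while j < n and answer[j] == 'O':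
--                 j += 1
--             L = j - i
--             total += L * (L + 1) // 2
--             i = j
--         else:
--             i += 1
--     return total
-- ===== Notes on version B (the rewrite author's own statement) =====
-- stated objective: alternative
-- what changed: Replaces the per-character streak accumulator with a run scanner that finds each maximal run of 'O' and adds its closed-form triangular number L*(L+1)//2.
import Mathlib
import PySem

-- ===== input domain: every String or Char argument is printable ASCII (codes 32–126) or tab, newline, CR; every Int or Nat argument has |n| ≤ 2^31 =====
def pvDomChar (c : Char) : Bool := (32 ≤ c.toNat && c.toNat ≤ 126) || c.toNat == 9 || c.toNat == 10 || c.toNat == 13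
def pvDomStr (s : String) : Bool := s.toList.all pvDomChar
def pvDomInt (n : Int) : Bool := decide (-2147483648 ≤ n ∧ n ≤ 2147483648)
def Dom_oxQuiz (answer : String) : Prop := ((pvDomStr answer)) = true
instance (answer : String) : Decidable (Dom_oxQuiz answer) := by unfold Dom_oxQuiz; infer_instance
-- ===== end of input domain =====

-- ===== PORT A =====
def oxQuiz (answer : String) : Int :=
  ((answer.toList).foldl
    (fun (s : Int × Int) x => if x = 'O' then (s.1 + 1, s.2 + (s.1 + 1)) else ((0 : Int), s.2))
    ((0 : Int), (0 : Int))).2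

-- ===== PORT B =====
-- B scans maximal runs of 'O' and adds the closed-form triangular number L*(L+1)//2 per run.
def bGo : List Char → Int
  | [] => 0
  | c :: rest =>
    if c = 'O' then
      let L : Int := ((rest.takeWhile (fun x => x = 'O')).length : Int) + 1
      PySem.Int.floordiv (L * (L + 1)) 2 + bGo (rest.dropWhile (fun x => x = 'O'))
    else bGo rest
termination_by l => l.length
decreasing_by
  · simpa [Nat.lt_succ_iff] using List.length_dropWhile_le (fun x => x = 'O') rest
  · simp

def oxQuiz_alt (answer : String) : Int := bGo answer.toList

-- ===== PRECONDITION & SPEC =====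
def Spec_oxQuiz (answer : String) (out : Int) : Prop := out = oxQuiz_alt answer
instance (answer : String) (out : Int) : Decidable (Spec_oxQuiz answer out) := by unfold Spec_oxQuiz; infer_instance

-- ===== CLAIM (what is proved, stated in full; the proofs are below) =====
def Claim_equal_oxQuiz : Prop := ∀ (answer : String), Dom_oxQuiz answer → Spec_oxQuiz answer (oxQuiz answer)

-- ===== LEMMAS AND PROOFS =====


def triNat : Nat → Int
  | 0 => 0
  | n + 1 => triNat n + (n + 1)

theorem two_mul_triNat (n : Nat) : 2 * triNat n = (n : Int) * (n + 1) := by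
  induction n with
  | zero => simp [triNat]
  | succ n ih => simp [triNat]; push_cast; push_cast at ih; ring_nf; ring_nf at ih; omega

theorem floordiv_tri (n : Nat) :
    PySem.Int.floordiv ((n : Int) * ((n : Int) + 1)) 2 = triNat n := by
  have h := two_mul_triNat n
  rw [PySem.Int.floordiv_eq_ediv_of_pos (by omega)]
  omega

def stepA (s : Int × Int) (x : Char) : Int × Int :=
  if x = 'O' then (s.1 + 1, s.2 + (s.1 + 1)) else ((0 : Int), s.2)

theorem run_lemma (l : List Char) (hO : ∀ x ∈ l, x = 'O') (p t : Int) :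
    List.foldl stepA (p, t) l = (p + l.length, t + l.length * p + triNat l.length) := by
  induction l generalizing p t with
  | nil => simp [triNat]
  | cons c rest ih =>
    have hc : c = 'O' := hO c (by simp)
    have hrest : ∀ x ∈ rest, x = 'O' := fun x hx => hO x (by simp [hx])
    simp only [List.foldl_cons, stepA, hc, if_pos rfl]
    rw [ih hrest]
    simp [triNat]
    constructor
    · push_cast; ring
    · push_cast; ring

theorem head_dropWhile (l : List Char) (c : Char) (rest : List Char)
    (h : l.dropWhile (fun x => x = 'O') = c :: rest) : c ≠ 'O' := by
  intro hc
  have := List.head?_dropWhile_not (fun x => x = 'O') l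
  rw [h] at this
  simp [hc] at this

theorem main_lemma : ∀ (n : Nat) (l : List Char), l.length ≤ n → ∀ (p t : Int),
    (l.head? = some 'O' → p = 0) →
    (List.foldl stepA (p, t) l).2 = t + bGo l := by
  intro n
  induction n with
  | zero =>
    intro l hl p t _
    have : l = [] := List.eq_nil_of_length_eq_zero (Nat.le_zero.mp hl)
    simp [this, bGo]
  | succ n ih =>
    intro l hl p t hp
    match l with
    | [] => simp [bGo]
    | c :: rest =>
      by_cases hc : c = 'O'
      · have hp0 : p = 0 := hp (by simp [hc])
        subst hp0; subst hc
        set run := rest.takeWhile (fun x => x = 'O') with hrun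
        set drop := rest.dropWhile (fun x => x = 'O') with hdrop
        have hsplit : rest = run ++ drop := (List.takeWhile_append_dropWhile).symm
        have hOall : ∀ x ∈ ('O' :: run), x = 'O' := by
          intro x hx
          rcases List.mem_cons.mp hx with h | h
          · exact h
          · simpa using List.mem_takeWhile_imp h
        have hfold : List.foldl stepA ((0 : Int), t) ('O' :: rest)
            = List.foldl stepA (List.foldl stepA ((0 : Int), t) ('O' :: run)) drop := by
          rw [show ('O' :: rest) = ('O' :: run) ++ drop by rw [hsplit]; rfl,
            List.foldl_append]
        have hrunval := run_lemma ('O' :: run) hOall 0 t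
        have hdhead : drop.head? = some 'O' → (0 : Int) + (('O' :: run).length : Int) = 0 := by
          intro hh
          exfalso
          cases hd : drop with
          | nil => rw [hd] at hh; simp at hh
          | cons c' rest' =>
            have hc' : c' = 'O' := by rw [hd] at hh; simpa using hh
            exact head_dropWhile rest c' rest' (hdrop.symm.trans hd) hc'
        have hdlen : drop.length ≤ n := by
          have h1 := List.length_dropWhile_le (fun x => x = 'O') rest
          rw [← hdrop] at h1
          have h2 : rest.length ≤ n := by simpa using hl
          omega
        rw [hfold, hrunval]
        rw [ih drop hdlen _ _ hdhead]
        show t + (('O' :: run).length : Int) * 0 + triNat ('O' :: run).length + bGo drop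
            = t + bGo ('O' :: rest)
        have hbgo : bGo ('O' :: rest)
            = PySem.Int.floordiv (((run.length : Int) + 1) * (((run.length : Int) + 1) + 1)) 2
              + bGo drop := by
          rw [bGo]
          simp [← hrun, ← hdrop]
        rw [hbgo]
        have : PySem.Int.floordiv (((run.length : Int) + 1) * (((run.length : Int) + 1) + 1)) 2
            = triNat (run.length + 1) := by
          have := floordiv_tri (run.length + 1)
          push_cast at this ⊢
          convert this using 3 <;> push_cast <;> ring
        rw [this]
        simp
        ring
      · have hstep : stepA (p, t) c = ((0 : Int), t) := by simp [stepA, hc]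
        simp only [List.foldl_cons, hstep]
        rw [ih rest (by simpa using hl) 0 t (fun _ => rfl)]
        have : bGo (c :: rest) = bGo rest := by rw [bGo]; simp [hc]
        rw [this]

-- ===== VERDICT (by name: the statement is the Claim_ definition above) =====
theorem oxQuiz_spec : Claim_equal_oxQuiz := by
  intro answer _
  unfold Spec_oxQuiz oxQuiz oxQuiz_alt
  have := main_lemma answer.toList.length answer.toList le_rfl 0 0 (fun _ => rfl)
  simpa [stepA] using this
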